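-- pv_equiv track=rewrite | github.com/Rahulvijayan123/Convexia-alpha-4th-time-a-charm | eval/benchmark.py | _pick_id_column
-- ===== SOURCE A (Python) =====
-- from typing import Iterable, List, Optional
--
-- def _norm_header(h: str) -> str:
--     # Lowercase + remove non-alphanumerics to be tolerant to headers like "Asset Name / Code"
--     return "".join(ch for ch in (h or "").strip().lower() if ch.isalnum())
--
-- _DEFAULT_ID_HEADER_CANDIDATES = (
--     "identifier",
--     "id",
--     "assetid",
--     "assetcode",
--     "assetnamecode",
--     "assetname",
--     "asset",
--     "code",
--     "assetnamecode",  # duplicate ok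
--     "assetnamecode",  # keep simple
-- )
--
-- def _pick_id_column(fieldnames: Iterable[str]) -> Optional[str]:
--     if not fieldnames:
--         return None
--     by_norm = {_norm_header(h): h for h in fieldnames if h}
--     for cand in _DEFAULT_ID_HEADER_CANDIDATES:
--         if cand in by_norm:
--             return by_norm[cand]
--     return None
-- ===== SOURCE B (Python) =====
-- from typing import Iterable, Optional
--
-- def _norm_header(h: str) -> str:
--     return "".join(ch for ch in (h or "").strip().lower() if ch.isalnum())
--
-- _DEFAULT_ID_HEADER_CANDIDATES = (
--     "identifier",
--     "id",
--     "assetid",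
--     "assetcode",
--     "assetnamecode",
--     "assetname",
--     "asset",
--     "code",
--     "assetnamecode",
--     "assetnamecode",
-- )
--
-- def _pick_id_column(fieldnames: Iterable[str]) -> Optional[str]:
--     headers = list(fieldnames)
--     if not headers:
--         return None
--     for cand in _DEFAULT_ID_HEADER_CANDIDATES:
--         match = None
--         for h in headers:
--             if h and _norm_header(h) == cand:
--                 match = h
--         if match is not None:
--             return match
--     return None
-- ===== Notes on version B (the rewrite author's own statement) =====
-- stated objective: alternative
-- what changed: B drops the precomputed normalized-header dict and instead scans the materialized header list once per candidate in priority order, keeping the last matching header (which is what the dict's overwrite semantics yield).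
import Mathlib
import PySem

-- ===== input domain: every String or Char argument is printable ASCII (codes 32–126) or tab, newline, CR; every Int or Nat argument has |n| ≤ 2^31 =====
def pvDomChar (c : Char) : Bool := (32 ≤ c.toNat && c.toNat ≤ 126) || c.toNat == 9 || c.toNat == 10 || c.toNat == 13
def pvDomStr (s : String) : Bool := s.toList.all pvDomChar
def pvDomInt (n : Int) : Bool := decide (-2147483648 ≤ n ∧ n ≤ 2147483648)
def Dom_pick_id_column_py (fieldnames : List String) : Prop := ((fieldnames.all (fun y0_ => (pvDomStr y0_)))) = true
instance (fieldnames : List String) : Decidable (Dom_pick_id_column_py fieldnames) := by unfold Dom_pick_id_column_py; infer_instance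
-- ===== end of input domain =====

-- B: per-candidate scan keeping the last matching header, instead of A's dict build + lookup (alternative decomposition; return value only).
-- ===== PORT A =====
-- _norm_header: "".join(ch for ch in (h or "").strip().lower() if ch.isalnum())  ((h or "") = h here: strip/lower of "" is "")
def pvNormHeader (h : String) : String :=
  String.ofList ((PySem.Chars.lower (PySem.Chars.strip h.toList)).filter PySem.Chars.isalnum)

def pvCandidates : List String :=
  ["identifier", "id", "assetid", "assetcode", "assetnamecode",
   "assetname", "asset", "code", "assetnamecode", "assetnamecode"]

-- for cand in candidates: if cand in by_norm: return by_norm[cand]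
def pvLookupLoop (cands : List String) (d : PySem.Dict String String) : Option String :=
  match cands with
  | [] => none
  | c :: rest => if d.contains c then d.get? c else pvLookupLoop rest d

def pick_id_column_py (fieldnames : List String) : Option String :=
  if fieldnames = [] then none
  else
    let byNorm := fieldnames.foldl
      (fun d h => if h ≠ "" then d.insert (pvNormHeader h) h else d) PySem.Dict.empty
    pvLookupLoop pvCandidates byNorm

-- ===== PORT B =====
-- inner loop: match = h for the last truthy header normalizing to cand
def pvLastMatch (headers : List String) (cand : String) : Option String :=
  headers.foldl (fun acc h => if h ≠ "" && pvNormHeader h == cand then some h else acc) none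

def pvCandLoop (cands : List String) (headers : List String) : Option String :=
  match cands with
  | [] => none
  | c :: rest =>
    match pvLastMatch headers c with
    | some h => some h
    | none => pvCandLoop rest headers

def pick_id_column_py_alt (fieldnames : List String) : Option String :=
  let headers := fieldnames
  if headers = [] then none
  else pvCandLoop pvCandidates headers

-- ===== PRECONDITION & SPEC =====
def Spec_pick_id_column_py (fieldnames : List String) (out : Option String) : Prop := out = pick_id_column_py_alt fieldnames
instance (fieldnames : List String) (out : Option String) : Decidable (Spec_pick_id_column_py fieldnames out) := by unfold Spec_pick_id_column_py; infer_instance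

-- ===== CLAIM (what is proved, stated in full; the proofs are below) =====
def Claim_equal_pick_id_column_py : Prop := ∀ (fieldnames : List String), Dom_pick_id_column_py fieldnames → Spec_pick_id_column_py fieldnames (pick_id_column_py fieldnames)

-- ===== LEMMAS AND PROOFS =====

-- dict built by the filtered insert loop looked up at c = the last-match accumulator over the same list
lemma pv_get_eq_acc (hs : List String) (d : PySem.Dict String String) (c : String) :
    (hs.foldl (fun d h => if h ≠ "" then d.insert (pvNormHeader h) h else d) d).get? c
      = hs.foldl (fun acc h => if h ≠ "" && pvNormHeader h == c then some h else acc) (d.get? c) := by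
  induction hs generalizing d with
  | nil => rfl
  | cons h t ih =>
    simp only [List.foldl_cons]
    by_cases hh : h = ""
    · rw [if_neg (by simp [hh]), if_neg (by simp [hh])]
      exact ih d
    · rw [if_pos (by simp [hh]), ih]
      congr 1
      rw [PySem.Dict.get?_insert]
      by_cases hc : pvNormHeader h = c
      · simp [hc, hh]
      · simp [hc, Ne.symm hc]

lemma pv_loop_eq (cands : List String) (hs : List String) :
    pvLookupLoop cands (hs.foldl (fun d h => if h ≠ "" then d.insert (pvNormHeader h) h else d) PySem.Dict.empty)
      = pvCandLoop cands hs := by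
  induction cands with
  | nil => rfl
  | cons c rest ih =>
    have hg : (hs.foldl (fun d h => if h ≠ "" then d.insert (pvNormHeader h) h else d) PySem.Dict.empty).get? c
        = pvLastMatch hs c := by
      rw [pv_get_eq_acc]; simp [pvLastMatch, PySem.Dict.get?_empty]
    simp only [pvLookupLoop, pvCandLoop, ← ih, PySem.Dict.contains_eq_isSome_get?, hg]
    cases pvLastMatch hs c <;> simp

-- ===== VERDICT (by name: the statement is the Claim_ definition above) =====
theorem pick_id_column_py_spec : Claim_equal_pick_id_column_py := by
  intro fieldnames _
  unfold Spec_pick_id_column_py pick_id_column_py pick_id_column_py_alt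
  by_cases h : fieldnames = []
  · simp [h]
  · simp only [h, if_false]
    exact pv_loop_eq pvCandidates fieldnames
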